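-- pv_equiv track=rewrite | github.com/lahm3d/cdi_gage_analysis | lapis/gps_time.py | _count_leaps
-- ===== SOURCE A (Python) =====
-- def _count_leaps(gps_time):
--     """
--     Count the number of leap seconds that have passed.
--
--     Args:
--         gps_time (int or float): The GPS time in seconds.
--
--     Returns:
--         int: The number of leap seconds that have passed.
--
--     """
--     leaps = (
--         46828800, 78364801, 109900802, 173059203, 252028804,
--         315187205, 346723206, 393984007, 425520008, 457056009,
--         504489610, 551750411, 599184012, 820108813, 914803214,
--         1025136015
--     )
--
--     no_leaps = 0
--     for leap in leaps:
--         if gps_time >= leap: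
--             no_leaps += 1
--
--     return no_leaps
-- ===== SOURCE B (Python) =====
-- import bisect
--
-- def _count_leaps(gps_time):
--     """Count the number of leap seconds that have passed (binary search)."""
--     leaps = (
--         46828800, 78364801, 109900802, 173059203, 252028804,
--         315187205, 346723206, 393984007, 425520008, 457056009,
--         504489610, 551750411, 599184012, 820108813, 914803214,
--         1025136015
--     )
--     return bisect.bisect_right(leaps, gps_time)
-- ===== Notes on version B (the rewrite author's own statement) =====
-- stated objective: idiomatic
-- what changed: The explicit counting loop over the sorted leap-second tuple is replaced by a single bisect.bisect_right binary search, which returns the number of thresholds <= gps_time directly.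
import Mathlib
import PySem

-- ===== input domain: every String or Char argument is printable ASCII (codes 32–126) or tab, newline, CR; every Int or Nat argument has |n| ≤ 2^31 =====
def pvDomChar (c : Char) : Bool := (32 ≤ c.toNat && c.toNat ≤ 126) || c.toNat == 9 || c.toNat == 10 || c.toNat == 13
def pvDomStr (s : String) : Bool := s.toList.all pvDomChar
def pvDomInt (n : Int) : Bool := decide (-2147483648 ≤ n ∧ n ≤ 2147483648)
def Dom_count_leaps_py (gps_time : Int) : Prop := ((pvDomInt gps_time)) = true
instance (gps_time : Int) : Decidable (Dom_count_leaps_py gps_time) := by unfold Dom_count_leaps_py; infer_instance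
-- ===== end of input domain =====

-- B replaces A's linear counting loop over the sorted leap tuple with a bisect_right binary search (idiomatic).

-- ===== PORT A =====
def pvLeaps : List Int :=
  [46828800, 78364801, 109900802, 173059203, 252028804,
   315187205, 346723206, 393984007, 425520008, 457056009,
   504489610, 551750411, 599184012, 820108813, 914803214,
   1025136015]

def count_leaps_py (gps_time : Int) : Int :=
  pvLeaps.foldl (fun no_leaps leap => if gps_time ≥ leap then no_leaps + 1 else no_leaps) 0

-- ===== PORT B =====
def count_leaps_py_alt (gps_time : Int) : Int :=
  (PySem.List.bisectRight pvLeaps gps_time : Int)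

-- ===== PRECONDITION & SPEC =====
def Spec_count_leaps_py (gps_time : Int) (out : Int) : Prop := out = count_leaps_py_alt gps_time
instance (gps_time : Int) (out : Int) : Decidable (Spec_count_leaps_py gps_time out) := by unfold Spec_count_leaps_py; infer_instance

-- ===== CLAIM (what is proved, stated in full; the proofs are below) =====
def Claim_equal_count_leaps_py : Prop := ∀ (gps_time : Int), Dom_count_leaps_py gps_time → Spec_count_leaps_py gps_time (count_leaps_py gps_time)

-- ===== LEMMAS AND PROOFS =====

-- If the first k elements of xs satisfy p and the rest do not, then countP p xs = k.
theorem countP_eq_of_split (xs : List Int) (p : Int → Bool) (k : Nat) (hk : k ≤ xs.length)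
    (h1 : ∀ (j : Nat) (hj : j < xs.length), j < k → p xs[j])
    (h2 : ∀ (j : Nat) (hj : j < xs.length), k ≤ j → ¬ p xs[j]) :
    xs.countP p = k := by
  induction xs generalizing k with
  | nil => simpa using (hk.antisymm (Nat.zero_le _)).symm
  | cons x t ih =>
    cases k with
    | zero =>
      simp only [List.countP_cons]
      have hx : ¬ p x := by simpa using h2 0 (by simp) (Nat.zero_le _)
      have ht : t.countP p = 0 := by
        apply ih 0 (Nat.zero_le _) (by omega)
        intro j hj _
        simpa using h2 (j+1) (by simpa using Nat.succ_lt_succ hj) (Nat.zero_le _)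
      simp [ht, hx]
    | succ k =>
      have hx : p x := by simpa using h1 0 (by simp) (Nat.succ_pos _)
      have ht : t.countP p = k := by
        apply ih k (by simpa using hk)
        · intro j hj hjk
          simpa using h1 (j+1) (by simpa using Nat.succ_lt_succ hj) (Nat.succ_lt_succ hjk)
        · intro j hj hjk
          simpa using h2 (j+1) (by simpa using Nat.succ_lt_succ hj) (Nat.succ_le_succ hjk)
      simp [ht, hx]

-- ===== VERDICT (by name: the statement is the Claim_ definition above) =====
theorem count_leaps_py_spec : Claim_equal_count_leaps_py := by
  intro g _
  unfold Spec_count_leaps_py count_leaps_py count_leaps_py_alt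
  have hs : List.Pairwise (fun a b : Int => a ≤ b) pvLeaps := by decide
  obtain ⟨hk, h1, h2⟩ := PySem.List.bisectRight_spec pvLeaps g hs
  have hc : pvLeaps.countP (fun l => decide (g ≥ l)) = PySem.List.bisectRight pvLeaps g := by
    apply countP_eq_of_split _ _ _ hk
    · intro j hj hjk; simpa using h1 j hj hjk
    · intro j hj hjk; simpa using h2 j hj hjk
  calc pvLeaps.foldl (fun no_leaps leap => if g ≥ leap then no_leaps + 1 else no_leaps) 0
      = pvLeaps.foldl (fun acc x => if (decide (g ≥ x)) = true then acc + 1 else acc) 0 := by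
        simp
    _ = 0 + (pvLeaps.countP (fun l => decide (g ≥ l)) : Int) :=
        PySem.List.foldl_count_if (fun l => decide (g ≥ l)) pvLeaps 0
    _ = (PySem.List.bisectRight pvLeaps g : Int) := by rw [hc]; ring
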